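-- pv_equiv track=rewrite | github.com/zephyrus9/NewCoder | Huawei/e26 字符串排序.py | func
-- ===== SOURCE A (Python) =====
-- def func(l):
--     char = []
--     res = [0]*len(l)
--     for i, v in enumerate(l):
--         if v.isalpha():
--             char.append(v)
--         else:
--             res[i] = v
--     char = sorted(char, key=lambda s: s.lower())
--     for i, v in enumerate(res):
--         if not v:
--             res[i] = char[0]
--             char.pop(0)
--     return ''.join(res)
-- ===== SOURCE B (Python) =====
-- def func(l):
--     idx = [i for i, c in enumerate(l) if c.isalpha()]
--     letters = sorted((c for c in l if c.isalpha()), key=str.lower)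
--     res = list(l)
--     for i, c in zip(idx, letters):
--         res[i] = c
--     return ''.join(res)
-- ===== Notes on version B (the rewrite author's own statement) =====
-- stated objective: faster
-- what changed: B records the alphabetic positions in an index table and writes the sorted letters back only at those positions over a copy of the input, instead of A's falsy-sentinel placeholder array rescanned in full with pop(0) from the front of the sorted-letter list.
import Mathlib
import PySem

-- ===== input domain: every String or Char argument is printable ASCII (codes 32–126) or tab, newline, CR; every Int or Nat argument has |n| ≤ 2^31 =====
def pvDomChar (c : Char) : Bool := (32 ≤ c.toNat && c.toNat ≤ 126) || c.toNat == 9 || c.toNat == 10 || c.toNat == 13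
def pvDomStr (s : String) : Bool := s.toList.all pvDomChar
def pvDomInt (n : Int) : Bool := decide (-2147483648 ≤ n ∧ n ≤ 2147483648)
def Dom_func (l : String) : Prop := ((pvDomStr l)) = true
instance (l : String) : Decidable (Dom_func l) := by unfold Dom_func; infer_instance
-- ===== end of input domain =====

-- B replaces A's falsy-sentinel placeholder array (rescanned in full, popping the sorted
-- letters from the front) with an index table of the letter positions and a single
-- targeted write-back pass over a copy of the input; objective: faster (A's pop(0) refill is quadratic).


-- ===== PORT A =====
-- A's sentinel 0 (falsy) in `res` is ported as `none`, a real character as `some c`;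
-- `if not v` is `v.isNone`.  The key `s.lower()` on a one-character string compares
-- exactly like the lowered character.  `char[0]`/`char.pop(0)` would raise IndexError
-- on an empty `char`; the `[]` branch of the match marks that (never-reached) spot.
def func (l : String) : String :=
  let cs := l.toList
  let step1 := (PySem.List.enumerate cs 0).foldl
      (fun st p =>
        if PySem.Chars.isalpha p.2 then (st.1 ++ [p.2], st.2)
        else (st.1, st.2.set p.1.toNat (some p.2)))
      (([] : List Char), List.replicate cs.length (none : Option Char))
  let char := PySem.List.sorted step1.1 (fun c => PySem.Chars.lowerChar c) false
  let step2 := (PySem.List.enumerate step1.2 0).foldl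
      (fun st p =>
        if p.2.isNone then
          match st.2 with
          | c :: rest => (st.1.set p.1.toNat (some c), rest)
          | [] => (st.1, ([] : List Char))   -- Python would raise IndexError here; unreachable
        else st)
      (step1.2, char)
  String.ofList (step2.1.filterMap id)

-- ===== PORT B =====
def func_alt (l : String) : String :=
  let cs := l.toList
  let idx := (PySem.List.enumerate cs 0).filterMap
      (fun p => if PySem.Chars.isalpha p.2 then some p.1 else none)
  let letters := PySem.List.sorted (cs.filter (fun c => PySem.Chars.isalpha c))
      (fun c => PySem.Chars.lowerChar c) false
  let res := (idx.zip letters).foldl (fun r p => r.set p.1.toNat p.2) cs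
  String.ofList res

-- ===== PRECONDITION & SPEC =====
def Spec_func (l : String) (out : String) : Prop := out = func_alt l
instance (l : String) (out : String) : Decidable (Spec_func l out) := by unfold Spec_func; infer_instance

-- ===== CLAIM (what is proved, stated in full; the proofs are below) =====
def Claim_equal_func : Prop := ∀ (l : String), Dom_func l → Spec_func l (func l)

-- ===== LEMMAS AND PROOFS =====

-- the common value of both programs: walk the input, replacing successive letters
-- by successive elements of s (the sorted letters)
def pvMerge : List Char → List Char → List Char
  | [], _ => []
  | c :: cs, s =>
    if PySem.Chars.isalpha c then
      match s with
      | x :: xs => x :: pvMerge cs xs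
      | [] => pvMerge cs []
    else c :: pvMerge cs s

-- what A's second loop computes: the filled res and the leftover char list
def pvFill : List (Option Char) → List Char → List (Option Char) × List Char
  | [], s => ([], s)
  | none :: rs, x :: s => let r := pvFill rs s; (some x :: r.1, r.2)
  | none :: rs, [] => let r := pvFill rs []; ((none : Option Char) :: r.1, r.2)
  | some v :: rs, s => let r := pvFill rs s; (some v :: r.1, r.2)

theorem pv_loop1 (cs : List Char) : ∀ (k : Nat) (acc : List Char) (pre : List (Option Char)),
    pre.length = k →
    (PySem.List.enumerate cs (k : Int)).foldl
      (fun st p =>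
        if PySem.Chars.isalpha p.2 then (st.1 ++ [p.2], st.2)
        else (st.1, st.2.set p.1.toNat (some p.2)))
      (acc, pre ++ List.replicate cs.length none)
    = (acc ++ cs.filter (fun c => PySem.Chars.isalpha c),
       pre ++ cs.map (fun v => if PySem.Chars.isalpha v then none else some v)) := by
  induction cs with
  | nil => intro k acc pre h; simp [PySem.List.enumerate]
  | cons c cs ih =>
    intro k acc pre h
    subst h
    rw [PySem.List.enumerate_cons, List.length_cons, List.replicate_succ, List.foldl_cons]
    by_cases hc : PySem.Chars.isalpha c = true
    · have hih := ih (pre.length + 1) (acc ++ [c]) (pre ++ [none]) (by simp)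
      rw [Nat.cast_add, Nat.cast_one] at hih
      simp only [List.append_assoc, List.singleton_append] at hih
      simp [hc, hih]
    · have hih := ih (pre.length + 1) acc (pre ++ [some c]) (by simp)
      rw [Nat.cast_add, Nat.cast_one] at hih
      simp only [List.append_assoc, List.singleton_append] at hih
      simp [hc, hih]

theorem pv_loop2 (rs : List (Option Char)) : ∀ (k : Nat) (pre : List (Option Char)) (s : List Char),
    pre.length = k →
    (PySem.List.enumerate rs (k : Int)).foldl
      (fun st p =>
        if p.2.isNone then
          match st.2 with
          | c :: rest => (st.1.set p.1.toNat (some c), rest)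
          | [] => (st.1, ([] : List Char))
        else st)
      (pre ++ rs, s)
    = (pre ++ (pvFill rs s).1, (pvFill rs s).2) := by
  induction rs with
  | nil => intro k pre s h; simp [PySem.List.enumerate, pvFill]
  | cons r rs ih =>
    intro k pre s h
    subst h
    rw [PySem.List.enumerate_cons, List.foldl_cons]
    match r, s with
    | none, x :: s =>
      have hih := ih (pre.length + 1) (pre ++ [some x]) s (by simp)
      rw [Nat.cast_add, Nat.cast_one] at hih
      simp only [List.append_assoc, List.singleton_append, Option.isNone_iff_eq_none] at hih
      simp [pvFill, hih]
    | none, [] =>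
      have hih := ih (pre.length + 1) (pre ++ [none]) [] (by simp)
      rw [Nat.cast_add, Nat.cast_one] at hih
      simp only [List.append_assoc, List.singleton_append, Option.isNone_iff_eq_none] at hih
      simp [pvFill, hih]
    | some v, s =>
      have hih := ih (pre.length + 1) (pre ++ [some v]) s (by simp)
      rw [Nat.cast_add, Nat.cast_one] at hih
      simp only [List.append_assoc, List.singleton_append, Option.isNone_iff_eq_none] at hih
      simp [pvFill, hih]

theorem pv_fill_merge (cs : List Char) : ∀ s : List Char,
    s.length = cs.countP (fun c => PySem.Chars.isalpha c) →
    ((pvFill (cs.map (fun v => if PySem.Chars.isalpha v then none else some v)) s).1).filterMap id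
    = pvMerge cs s := by
  induction cs with
  | nil => intro s h; simp [pvFill, pvMerge]
  | cons c cs ih =>
    intro s h
    rw [List.countP_cons] at h
    by_cases hc : PySem.Chars.isalpha c = true
    · simp only [hc, if_true] at h
      match s, h with
      | x :: s, h =>
        simp only [List.length_cons, Nat.add_right_cancel_iff] at h
        have hih := ih s h
        simp only [Function.id_def] at hih
        simp [pvFill, pvMerge, hc, hih]
    · simp [hc] at h
      have hih := ih s h
      simp only [Function.id_def] at hih
      simp [pvFill, pvMerge, hc, hih]

theorem pv_b_merge (cs : List Char) : ∀ (k : Nat) (pre : List Char) (s : List Char),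
    pre.length = k → s.length = cs.countP (fun c => PySem.Chars.isalpha c) →
    ((((PySem.List.enumerate cs (k : Int)).filterMap
        (fun p => if PySem.Chars.isalpha p.2 then some p.1 else none)).zip s).foldl
      (fun r p => r.set p.1.toNat p.2) (pre ++ cs))
    = pre ++ pvMerge cs s := by
  induction cs with
  | nil => intro k pre s _ _; simp [PySem.List.enumerate, pvMerge]
  | cons c cs ih =>
    intro k pre s hk h
    subst hk
    rw [List.countP_cons] at *
    rw [PySem.List.enumerate_cons, List.filterMap_cons]
    by_cases hc : PySem.Chars.isalpha c = true
    · simp only [hc, if_true] at h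
      match s with
      | x :: s =>
        have hlen : s.length = List.countP (fun c => PySem.Chars.isalpha c) cs := by
          simpa using ‹(x :: s).length = _ + 1›
        have hih := ih (pre.length + 1) (pre ++ [x]) s (by simp) hlen
        rw [Nat.cast_add, Nat.cast_one] at hih
        simp only [List.append_assoc, List.singleton_append] at hih
        simp [pvMerge, hc, hih]
    · simp [hc] at h
      have hih := ih (pre.length + 1) (pre ++ [c]) s (by simp) h
      rw [Nat.cast_add, Nat.cast_one] at hih
      simp only [List.append_assoc, List.singleton_append] at hih
      simp [pvMerge, hc, hih]

-- ===== VERDICT (by name: the statement is the Claim_ definition above) =====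
theorem func_spec : Claim_equal_func := by
  intro l _
  unfold Spec_func func func_alt
  have hlen : (PySem.List.sorted (l.toList.filter (fun c => PySem.Chars.isalpha c))
        (fun c => PySem.Chars.lowerChar c) false).length
      = l.toList.countP (fun c => PySem.Chars.isalpha c) := by
    rw [PySem.List.length_sorted]
    exact List.countP_eq_length_filter.symm
  have h1 := pv_loop1 l.toList 0 [] [] rfl
  have h2 := pv_loop2 (l.toList.map (fun v => if PySem.Chars.isalpha v then none else some v)) 0 []
      (PySem.List.sorted (l.toList.filter (fun c => PySem.Chars.isalpha c))
        (fun c => PySem.Chars.lowerChar c) false) rfl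
  have h3 := pv_fill_merge l.toList _ hlen
  have h4 := pv_b_merge l.toList 0 [] _ rfl hlen
  simp only [Nat.cast_zero, List.nil_append] at h1 h2 h4
  simp at h1 h2 h3 h4
  simp [h1, h2, h3, h4]
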